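-- pv_equiv track=rewrite | github.com/jcgood/planars | planars/spans.py | blocked_span
-- ===== SOURCE A (Python) =====
-- from typing import Dict, Set, Tuple
--
-- def blocked_span(
--     all_positions: Set[int],
--     blocked_positions: Set[int],
--     keystone_pos: int,
-- ) -> Tuple[int, int]:
--     """Expand from keystone through all positions, stopping just before any blocked position.
--
--     The blocked position is excluded from the span. Used for stress domains where
--     the edge is defined by the first position containing a boundary-triggering element,
--     rather than by positions that qualify.
--
--     Walking outward from the keystone in each direction, we include each successive
--     position until we reach one in blocked_positions — at which point we stop and
--     exclude that position (and everything beyond it). The keystone itself is always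
--     included regardless of whether it is in blocked_positions.
--
--     Args:
--         all_positions: all position numbers in the data (excluding keystone).
--         blocked_positions: positions that trigger a domain boundary.
--         keystone_pos: position number of the keystone (v:verbstem).
--
--     Returns:
--         (left_edge, right_edge) position numbers of the span.
--     """
--     left = right = keystone_pos
--
--     # Walk leftward from keystone; stop before the first blocked position.
--     for pos in sorted([p for p in all_positions if p < keystone_pos], reverse=True):
--         if pos in blocked_positions:
--             break
--         left = pos
--
--     # Walk rightward from keystone; stop before the first blocked position.
--     for pos in sorted([p for p in all_positions if p > keystone_pos]):
--         if pos in blocked_positions: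
--             break
--         right = pos
--
--     return left, right
-- ===== SOURCE B (Python) =====
-- def blocked_span(all_positions, blocked_positions, keystone_pos):
--     k = keystone_pos
--     blocked = set(blocked_positions)
--     # nearest blocked position on each side of the keystone (None if no blocked side)
--     lb = max((p for p in all_positions if p < k and p in blocked), default=None)
--     rb = min((p for p in all_positions if p > k and p in blocked), default=None)
--     # span edge = farthest position strictly between the keystone and the nearest block
--     left = min((p for p in all_positions if p < k and (lb is None or lb < p)), default=k)
--     right = max((p for p in all_positions if p > k and (rb is None or p < rb)), default=k)
--     return left, right
-- ===== Notes on version B (the rewrite author's own statement) =====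
-- stated objective: alternative
-- what changed: Replaces the two sort-then-walk-with-break loops by direct max/min passes: nearest blocked position on each side, then the farthest position strictly inside that bound (no sorting, O(n) vs O(n log n), though not measurably faster in CPython).
import Mathlib
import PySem

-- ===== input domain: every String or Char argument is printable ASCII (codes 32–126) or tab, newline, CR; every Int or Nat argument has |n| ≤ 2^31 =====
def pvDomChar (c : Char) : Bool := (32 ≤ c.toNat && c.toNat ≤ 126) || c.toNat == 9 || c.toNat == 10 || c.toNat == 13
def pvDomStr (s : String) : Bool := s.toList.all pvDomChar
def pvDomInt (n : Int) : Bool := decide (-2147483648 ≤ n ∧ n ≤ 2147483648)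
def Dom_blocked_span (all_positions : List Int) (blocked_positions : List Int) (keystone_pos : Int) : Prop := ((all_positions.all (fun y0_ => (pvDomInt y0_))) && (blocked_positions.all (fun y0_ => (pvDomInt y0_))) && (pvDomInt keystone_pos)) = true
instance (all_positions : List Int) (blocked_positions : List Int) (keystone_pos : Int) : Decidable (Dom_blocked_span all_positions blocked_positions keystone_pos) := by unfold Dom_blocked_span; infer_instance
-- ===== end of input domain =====

-- B replaces A's two sort-then-walk loops by direct max/min passes (nearest blocked
-- position per side, then farthest reachable position inside it); same return value.

-- ===== PORT A =====
-- the 'for pos in …: if pos in blocked: break; edge = pos' loop of A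
def pvWalk (bl : List Int) : List Int → Int → Int
  | [], acc => acc
  | p :: rest, acc => if bl.contains p then acc else pvWalk bl rest p

def blocked_span (all_positions : List Int) (blocked_positions : List Int) (keystone_pos : Int) : Int × Int :=
  let left := pvWalk blocked_positions
    (PySem.List.sorted (all_positions.filter (fun p => decide (p < keystone_pos))) (fun x => x) true) keystone_pos
  let right := pvWalk blocked_positions
    (PySem.List.sorted (all_positions.filter (fun p => decide (keystone_pos < p))) (fun x => x) false) keystone_pos
  (left, right)

-- ===== PORT B =====
-- 'lb is None or lb < p' / 'rb is None or p < rb'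
def pvGoodL (lb : Option Int) (p : Int) : Bool := match lb with | none => true | some m => decide (m < p)
def pvGoodR (rb : Option Int) (p : Int) : Bool := match rb with | none => true | some m => decide (p < m)

def blocked_span_alt (all_positions : List Int) (blocked_positions : List Int) (keystone_pos : Int) : Int × Int :=
  let lb := PySem.List.max? (all_positions.filter
    (fun p => decide (p < keystone_pos) && blocked_positions.contains p)) (fun x => x)
  let rb := PySem.List.min? (all_positions.filter
    (fun p => decide (keystone_pos < p) && blocked_positions.contains p)) (fun x => x)
  let left := (PySem.List.min? (all_positions.filter
    (fun p => decide (p < keystone_pos) && pvGoodL lb p)) (fun x => x)).getD keystone_pos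
  let right := (PySem.List.max? (all_positions.filter
    (fun p => decide (keystone_pos < p) && pvGoodR rb p)) (fun x => x)).getD keystone_pos
  (left, right)

-- ===== PRECONDITION & SPEC =====
def Spec_blocked_span (all_positions : List Int) (blocked_positions : List Int) (keystone_pos : Int) (out : Int × Int) : Prop := out = blocked_span_alt all_positions blocked_positions keystone_pos
instance (all_positions : List Int) (blocked_positions : List Int) (keystone_pos : Int) (out : Int × Int) : Decidable (Spec_blocked_span all_positions blocked_positions keystone_pos out) := by unfold Spec_blocked_span; infer_instance

-- ===== CLAIM (what is proved, stated in full; the proofs are below) =====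
def Claim_equal_blocked_span : Prop := ∀ (all_positions : List Int) (blocked_positions : List Int) (keystone_pos : Int), Dom_blocked_span all_positions blocked_positions keystone_pos → Spec_blocked_span all_positions blocked_positions keystone_pos (blocked_span all_positions blocked_positions keystone_pos)

-- ===== LEMMAS AND PROOFS =====

-- the walk is getLastD of the unblocked prefix
theorem pvWalk_eq_takeWhile (bl : List Int) (l : List Int) (a : Int) :
    pvWalk bl l a = (l.takeWhile (fun p => !bl.contains p)).getLastD a := by
  induction l generalizing a with
  | nil => rfl
  | cons p rest ih =>
    by_cases h : p ∈ bl
    · simp [pvWalk, h]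
    · simp [pvWalk, h, ih, List.getLast?_cons]

-- descending list, m the largest blocked element: the unblocked prefix is exactly the elements above m
theorem takeWhile_eq_filter_desc (bl : List Int) (m : Int) :
    ∀ l : List Int, l.Pairwise (fun a b => b ≤ a) → m ∈ l → bl.contains m = true →
      (∀ p ∈ l, bl.contains p = true → p ≤ m) →
      l.takeWhile (fun p => !bl.contains p) = l.filter (fun p => decide (m < p)) := by
  intro l
  induction l with
  | nil => intro _ hm; cases hm
  | cons p t ih =>
    intro hpw hm hmb hmax
    have hpt : ∀ q ∈ t, q ≤ p := (List.pairwise_cons.mp hpw).1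
    by_cases hlt : m < p
    · have hpb : bl.contains p = false := by
        by_contra h
        simp only [Bool.not_eq_false] at h
        exact absurd (hmax p (by simp) h) (by omega)
      have hmt : m ∈ t := by
        rcases List.mem_cons.mp hm with h | h
        · omega
        · exact h
      simp only [List.takeWhile_cons, List.filter_cons, hpb, Bool.not_false, decide_eq_true hlt,
        if_pos trivial]
      rw [ih (List.pairwise_cons.mp hpw).2 hmt hmb (fun q hq hqb => hmax q (by simp [hq]) hqb)]
    · have hpm : p = m := by
        rcases List.mem_cons.mp hm with h | h
        · omega
        · have := hpt m h; omega
      have hpb : bl.contains p = true := hpm ▸ hmb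
      have hfil : (p :: t).filter (fun p => decide (m < p)) = [] := by
        apply List.filter_eq_nil_iff.mpr
        intro q hq
        rcases List.mem_cons.mp hq with h | h
        · simp [h]; omega
        · have := hpt q h; simp; omega
      simp only [List.takeWhile_cons, hpb, Bool.not_true, hfil]
      rfl

-- ascending list, m the smallest blocked element: the unblocked prefix is exactly the elements below m
theorem takeWhile_eq_filter_asc (bl : List Int) (m : Int) :
    ∀ l : List Int, l.Pairwise (fun a b => a ≤ b) → m ∈ l → bl.contains m = true →
      (∀ p ∈ l, bl.contains p = true → m ≤ p) →
      l.takeWhile (fun p => !bl.contains p) = l.filter (fun p => decide (p < m)) := by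
  intro l
  induction l with
  | nil => intro _ hm; cases hm
  | cons p t ih =>
    intro hpw hm hmb hmin
    have hpt : ∀ q ∈ t, p ≤ q := (List.pairwise_cons.mp hpw).1
    by_cases hlt : p < m
    · have hpb : bl.contains p = false := by
        by_contra h
        simp only [Bool.not_eq_false] at h
        exact absurd (hmin p (by simp) h) (by omega)
      have hmt : m ∈ t := by
        rcases List.mem_cons.mp hm with h | h
        · omega
        · exact h
      simp only [List.takeWhile_cons, List.filter_cons, hpb, Bool.not_false, decide_eq_true hlt,
        if_pos trivial]
      rw [ih (List.pairwise_cons.mp hpw).2 hmt hmb (fun q hq hqb => hmin q (by simp [hq]) hqb)]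
    · have hpm : p = m := by
        rcases List.mem_cons.mp hm with h | h
        · omega
        · have := hpt m h; omega
      have hpb : bl.contains p = true := hpm ▸ hmb
      have hfil : (p :: t).filter (fun p => decide (p < m)) = [] := by
        apply List.filter_eq_nil_iff.mpr
        intro q hq
        rcases List.mem_cons.mp hq with h | h
        · simp [h]; omega
        · have := hpt q h; simp; omega
      simp only [List.takeWhile_cons, hpb, Bool.not_true, hfil]
      rfl

theorem getLastD_foldl_min : ∀ (t : List Int) (p : Int), (p :: t).Pairwise (fun a b => b ≤ a) →
    t.getLastD p = t.foldl min p := by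
  intro t
  induction t with
  | nil => intro p _; rfl
  | cons q t ih =>
    intro p hpw
    have hqp : q ≤ p := (List.pairwise_cons.mp hpw).1 q (by simp)
    have : min p q = q := by omega
    rw [List.getLastD_cons, List.foldl_cons, this]
    exact ih q (List.pairwise_cons.mp hpw).2

theorem getLastD_foldl_max : ∀ (t : List Int) (p : Int), (p :: t).Pairwise (fun a b => a ≤ b) →
    t.getLastD p = t.foldl max p := by
  intro t
  induction t with
  | nil => intro p _; rfl
  | cons q t ih =>
    intro p hpw
    have hqp : p ≤ q := (List.pairwise_cons.mp hpw).1 q (by simp)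
    have : max p q = q := by omega
    rw [List.getLastD_cons, List.foldl_cons, this]
    exact ih q (List.pairwise_cons.mp hpw).2

-- getLastD of a descending list is its minimum
theorem getLastD_desc (l : List Int) (d : Int) (h : l.Pairwise (fun a b => b ≤ a)) :
    l.getLastD d = (PySem.List.min? l (fun x => x)).getD d := by
  cases l with
  | nil => rfl
  | cons p t => rw [PySem.List.min?_id_cons, Option.getD_some, List.getLastD_cons,
      getLastD_foldl_min t p h]

-- getLastD of an ascending list is its maximum
theorem getLastD_asc (l : List Int) (d : Int) (h : l.Pairwise (fun a b => a ≤ b)) :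
    l.getLastD d = (PySem.List.max? l (fun x => x)).getD d := by
  cases l with
  | nil => rfl
  | cons p t => rw [PySem.List.max?_id_cons, Option.getD_some, List.getLastD_cons,
      getLastD_foldl_max t p h]

-- min?/max? with the identity key depend only on the multiset of elements
theorem min?_id_eq_of_perm (l l' : List Int) (h : l.Perm l') :
    PySem.List.min? l (fun x => x) = PySem.List.min? l' (fun x => x) := by
  cases hl : PySem.List.min? l (fun x => x) with
  | none =>
    have hn : l = [] := (PySem.List.min?_eq_none_iff _ _).mp hl
    subst hn
    have hn' : l' = [] := h.symm.eq_nil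
    subst hn'
    rfl
  | some m =>
    cases hl' : PySem.List.min? l' (fun x => x) with
    | none =>
      have : l' = [] := (PySem.List.min?_eq_none_iff _ _).mp hl'
      subst this
      have := h.eq_nil
      subst this
      simp [PySem.List.min?] at hl
    | some m' =>
      have hm : m ∈ l := PySem.List.min?_mem hl
      have hm' : m' ∈ l' := PySem.List.min?_mem hl'
      have h1 : m ≤ m' := PySem.List.min?_isMin hl m' (h.mem_iff.mpr hm')
      have h2 : m' ≤ m := PySem.List.min?_isMin hl' m (h.mem_iff.mp hm)
      have : m = m' := le_antisymm h1 h2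
      rw [this]

theorem max?_id_eq_of_perm (l l' : List Int) (h : l.Perm l') :
    PySem.List.max? l (fun x => x) = PySem.List.max? l' (fun x => x) := by
  cases hl : PySem.List.max? l (fun x => x) with
  | none =>
    have hn : l = [] := (PySem.List.max?_eq_none_iff _ _).mp hl
    subst hn
    have hn' : l' = [] := h.symm.eq_nil
    subst hn'
    rfl
  | some m =>
    cases hl' : PySem.List.max? l' (fun x => x) with
    | none =>
      have : l' = [] := (PySem.List.max?_eq_none_iff _ _).mp hl'
      subst this
      have := h.eq_nil
      subst this
      simp [PySem.List.max?] at hl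
    | some m' =>
      have hm : m ∈ l := PySem.List.max?_mem hl
      have hm' : m' ∈ l' := PySem.List.max?_mem hl'
      have h1 : m' ≤ m := PySem.List.max?_isMax hl m' (h.mem_iff.mpr hm')
      have h2 : m ≤ m' := PySem.List.max?_isMax hl' m (h.mem_iff.mp hm)
      have : m = m' := le_antisymm h2 h1
      rw [this]

-- left components agree
theorem left_eq (all bl : List Int) (k : Int) :
    pvWalk bl (PySem.List.sorted (all.filter (fun p => decide (p < k))) (fun x => x) true) k =
    (PySem.List.min? (all.filter (fun p => decide (p < k) &&
        pvGoodL (PySem.List.max? (all.filter (fun p => decide (p < k) && bl.contains p)) (fun x => x)) p))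
      (fun x => x)).getD k := by
  set S := all.filter (fun p => decide (p < k)) with hS
  set ls := PySem.List.sorted S (fun x => x) true with hls
  have hperm : ls.Perm S := PySem.List.sorted_perm S (fun x => x) true
  have hpw : ls.Pairwise (fun a b => b ≤ a) := PySem.List.sorted_pairwise_rev S (fun x => x)
  have hFF : all.filter (fun p => decide (p < k) && bl.contains p) =
      S.filter (fun p => bl.contains p) := by
    rw [hS, List.filter_filter]
    exact (List.filter_congr (fun x _ => by rw [Bool.and_comm])).symm
  rw [pvWalk_eq_takeWhile]
  cases hlb : PySem.List.max? (all.filter (fun p => decide (p < k) && bl.contains p)) (fun x => x) with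
  | none =>
    have hnil : all.filter (fun p => decide (p < k) && bl.contains p) = [] :=
      (PySem.List.max?_eq_none_iff _ _).mp hlb
    rw [hFF] at hnil
    have hnb : ∀ p ∈ ls, bl.contains p = false := by
      intro p hp
      by_contra h
      simp only [Bool.not_eq_false] at h
      have : p ∈ S.filter (fun p => bl.contains p) := List.mem_filter.mpr ⟨hperm.mem_iff.mp hp, h⟩
      rw [hnil] at this
      cases this
    rw [List.takeWhile_eq_self_iff.mpr (by intro x hx; simpa using hnb x hx)]
    have hgood : all.filter (fun p => decide (p < k) && pvGoodL none p) = S := by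
      rw [hS]
      exact List.filter_congr (fun x _ => by simp [pvGoodL])
    rw [hgood, getLastD_desc ls k hpw, min?_id_eq_of_perm ls S hperm]
  | some m =>
    have hmF : m ∈ all.filter (fun p => decide (p < k) && bl.contains p) := PySem.List.max?_mem hlb
    have hmax : ∀ y ∈ all.filter (fun p => decide (p < k) && bl.contains p), y ≤ m :=
      PySem.List.max?_isMax hlb
    rw [hFF] at hmF hmax
    have hmS : m ∈ S := (List.mem_filter.mp hmF).1
    have hmb : bl.contains m = true := (List.mem_filter.mp hmF).2
    have hmls : m ∈ ls := hperm.mem_iff.mpr hmS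
    have hmaxls : ∀ p ∈ ls, bl.contains p = true → p ≤ m := by
      intro p hp hpb
      exact hmax p (List.mem_filter.mpr ⟨hperm.mem_iff.mp hp, hpb⟩)
    rw [takeWhile_eq_filter_desc bl m ls hpw hmls hmb hmaxls]
    have hpwf : (ls.filter (fun p => decide (m < p))).Pairwise (fun a b => b ≤ a) :=
      List.Pairwise.filter _ hpw
    have hlist : all.filter (fun p => decide (p < k) && pvGoodL (some m) p)
        = S.filter (fun p => decide (m < p)) := by
      rw [hS, List.filter_filter]
      refine List.filter_congr (fun x _ => ?_)
      show (decide (x < k) && pvGoodL (some m) x) = (decide (m < x) && decide (x < k))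
      rw [Bool.and_comm]
      rfl
    rw [getLastD_desc _ k hpwf,
      min?_id_eq_of_perm _ (S.filter (fun p => decide (m < p))) (hperm.filter _), hlist]

-- right components agree
theorem right_eq (all bl : List Int) (k : Int) :
    pvWalk bl (PySem.List.sorted (all.filter (fun p => decide (k < p))) (fun x => x) false) k =
    (PySem.List.max? (all.filter (fun p => decide (k < p) &&
        pvGoodR (PySem.List.min? (all.filter (fun p => decide (k < p) && bl.contains p)) (fun x => x)) p))
      (fun x => x)).getD k := by
  set S := all.filter (fun p => decide (k < p)) with hS
  set ls := PySem.List.sorted S (fun x => x) false with hls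
  have hperm : ls.Perm S := PySem.List.sorted_perm S (fun x => x) false
  have hpw : ls.Pairwise (fun a b => a ≤ b) := PySem.List.sorted_pairwise S (fun x => x)
  have hFF : all.filter (fun p => decide (k < p) && bl.contains p) =
      S.filter (fun p => bl.contains p) := by
    rw [hS, List.filter_filter]
    exact (List.filter_congr (fun x _ => by rw [Bool.and_comm])).symm
  rw [pvWalk_eq_takeWhile]
  cases hrb : PySem.List.min? (all.filter (fun p => decide (k < p) && bl.contains p)) (fun x => x) with
  | none =>
    have hnil : all.filter (fun p => decide (k < p) && bl.contains p) = [] :=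
      (PySem.List.min?_eq_none_iff _ _).mp hrb
    rw [hFF] at hnil
    have hnb : ∀ p ∈ ls, bl.contains p = false := by
      intro p hp
      by_contra h
      simp only [Bool.not_eq_false] at h
      have : p ∈ S.filter (fun p => bl.contains p) := List.mem_filter.mpr ⟨hperm.mem_iff.mp hp, h⟩
      rw [hnil] at this
      cases this
    rw [List.takeWhile_eq_self_iff.mpr (by intro x hx; simpa using hnb x hx)]
    have hgood : all.filter (fun p => decide (k < p) && pvGoodR none p) = S := by
      rw [hS]
      exact List.filter_congr (fun x _ => by simp [pvGoodR])
    rw [hgood, getLastD_asc ls k hpw, max?_id_eq_of_perm ls S hperm]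
  | some m =>
    have hmF : m ∈ all.filter (fun p => decide (k < p) && bl.contains p) := PySem.List.min?_mem hrb
    have hmin : ∀ y ∈ all.filter (fun p => decide (k < p) && bl.contains p), m ≤ y :=
      PySem.List.min?_isMin hrb
    rw [hFF] at hmF hmin
    have hmS : m ∈ S := (List.mem_filter.mp hmF).1
    have hmb : bl.contains m = true := (List.mem_filter.mp hmF).2
    have hmls : m ∈ ls := hperm.mem_iff.mpr hmS
    have hminls : ∀ p ∈ ls, bl.contains p = true → m ≤ p := by
      intro p hp hpb
      exact hmin p (List.mem_filter.mpr ⟨hperm.mem_iff.mp hp, hpb⟩)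
    rw [takeWhile_eq_filter_asc bl m ls hpw hmls hmb hminls]
    have hpwf : (ls.filter (fun p => decide (p < m))).Pairwise (fun a b => a ≤ b) :=
      List.Pairwise.filter _ hpw
    have hlist : all.filter (fun p => decide (k < p) && pvGoodR (some m) p)
        = S.filter (fun p => decide (p < m)) := by
      rw [hS, List.filter_filter]
      refine List.filter_congr (fun x _ => ?_)
      show (decide (k < x) && pvGoodR (some m) x) = (decide (x < m) && decide (k < x))
      rw [Bool.and_comm]
      rfl
    rw [getLastD_asc _ k hpwf,
      max?_id_eq_of_perm _ (S.filter (fun p => decide (p < m))) (hperm.filter _), hlist]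

-- ===== VERDICT (by name: the statement is the Claim_ definition above) =====
theorem blocked_span_spec : Claim_equal_blocked_span := by
  intro all bl k _
  show blocked_span all bl k = blocked_span_alt all bl k
  simp only [blocked_span, blocked_span_alt]
  exact Prod.ext (left_eq all bl k) (right_eq all bl k)
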